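-- pv_equiv track=rewrite | github.com/comersaglam/Competitive_Programming_COS | Inzva_WC24/questions/algog.py | gcd_of_lcms
-- ===== SOURCE A (Python) =====
-- def gcd(a, b):
--     if b == 0:
--         return a
--     return gcd(b, a % b)
--
-- def lcm(a, b):
--     return a * b // gcd(a, b)
--
-- def gcd_of_lcms(arr):
--     n = len(arr)
--     lcm_first_last = lcm(arr[0], arr[-1])
--     gcd_of_lcms = lcm_first_last
--
--     for i in range(n):
--         for j in range(i + 1, n):
--             gcd_pair = gcd(arr[i], arr[j])
--             gcd_of_lcms = gcd(gcd_of_lcms, gcd_pair)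
--
--     return gcd_of_lcms
-- ===== SOURCE B (Python) =====
-- def _g(a, b):
--     while b:
--         a, b = b, a % b
--     return a
--
-- def gcd_of_lcms(arr):
--     r = arr[0] * arr[-1] // _g(arr[0], arr[-1])
--     for x in arr:
--         r = _g(r, x)
--     return r
-- ===== Notes on version B (the rewrite author's own statement) =====
-- stated objective: faster
-- what changed: Replaced the O(n^2) double loop over all pairwise gcds by a single gcd fold over the elements (the gcd of all pairwise gcds equals the gcd of all elements once the list has two or more entries, and the fold's sign behaviour is preserved), keeping the same lcm(first, last) seed.
import Mathlib
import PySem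

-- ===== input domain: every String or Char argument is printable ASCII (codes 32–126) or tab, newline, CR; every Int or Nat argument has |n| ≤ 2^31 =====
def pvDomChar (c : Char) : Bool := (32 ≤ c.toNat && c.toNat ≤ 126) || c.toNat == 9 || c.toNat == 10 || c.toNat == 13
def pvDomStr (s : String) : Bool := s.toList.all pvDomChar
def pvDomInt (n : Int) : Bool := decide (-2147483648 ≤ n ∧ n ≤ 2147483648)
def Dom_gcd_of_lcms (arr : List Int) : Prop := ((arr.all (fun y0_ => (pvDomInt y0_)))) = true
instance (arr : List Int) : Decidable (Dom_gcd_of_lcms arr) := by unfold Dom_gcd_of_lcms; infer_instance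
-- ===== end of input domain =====

-- B replaces A's O(n^2) double loop over pairwise gcds by a single gcd fold over the elements (same lcm(first, last) seed).

-- ===== PORT A =====
-- termination helper for the euclidean recursions (Python's %: sign of the divisor)
theorem pyModAbs_lt {a b : Int} (hb : ¬ b = 0) : (PySem.Int.mod a b).natAbs < b.natAbs := by
  rcases lt_trichotomy b 0 with h | h | h
  · have h1 := PySem.Int.mod_neg_bounds a h
    omega
  · exact absurd h hb
  · have h1 := PySem.Int.mod_nonneg a h
    have h2 := PySem.Int.mod_lt a h
    omega

-- A's recursive gcd(a, b)
def pyGcd (a b : Int) : Int :=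
  if h : b = 0 then a else pyGcd b (PySem.Int.mod a b)
termination_by b.natAbs
decreasing_by exact pyModAbs_lt h

-- A's lcm(a, b) = a * b // gcd(a, b) (Python floor division)
def pyLcm (a b : Int) : Int := PySem.Int.floordiv (a * b) (pyGcd a b)

def gcd_of_lcms (arr : List Int) : Int :=
  let n : Int := (arr.length : Int)
  match PySem.List.pyGet? arr 0, PySem.List.pyGet? arr (-1) with
  | some x0, some xl =>
    let lcm_first_last := pyLcm x0 xl
    (PySem.List.pyRange 0 n 1).foldl (fun g i =>
      (PySem.List.pyRange (i + 1) n 1).foldl (fun g j =>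
        pyGcd g (pyGcd (PySem.List.pyGetD arr i 0) (PySem.List.pyGetD arr j 0))) g) lcm_first_last
  | _, _ => 0   -- unreachable under Pre_ (IndexError in Python)

-- ===== PORT B =====
-- B's iterative _g(a, b): while b: a, b = b, a % b
def gcdLoop (a b : Int) : Int :=
  if h : b = 0 then a else gcdLoop b (PySem.Int.mod a b)
termination_by b.natAbs
decreasing_by exact pyModAbs_lt h

def gcd_of_lcms_alt (arr : List Int) : Int :=
  match PySem.List.pyGet? arr 0 with
  | none => 0   -- unreachable under Pre_ (IndexError in Python)
  | some x0 =>
    match PySem.List.pyGet? arr (-1) with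
    | none => 0   -- unreachable under Pre_ (IndexError in Python)
    | some xl =>
      arr.foldl (fun r x => gcdLoop r x)
        (PySem.Int.floordiv (x0 * xl) (gcdLoop x0 xl))

-- ===== PRECONDITION & SPEC =====
-- Pre_ excludes exactly the inputs where the Python A raises: the empty list (IndexError) and
-- lists whose first and last elements are both zero (ZeroDivisionError: lcm divides by a zero gcd).
def Pre_gcd_of_lcms (arr : List Int) : Prop :=
  arr ≠ [] ∧ ¬(arr.headI = 0 ∧ arr.getLastD 0 = 0)
instance (arr : List Int) : Decidable (Pre_gcd_of_lcms arr) := by unfold Pre_gcd_of_lcms; infer_instance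

def pvWitness_gcd_of_lcms : List Int := [4, 6, -9]

def Spec_gcd_of_lcms (arr : List Int) (out : Int) : Prop := out = gcd_of_lcms_alt arr
instance (arr : List Int) (out : Int) : Decidable (Spec_gcd_of_lcms arr out) := by unfold Spec_gcd_of_lcms; infer_instance

-- ===== CLAIM (what is proved, stated in full; the proofs are below) =====
def Claim_equal_gcd_of_lcms : Prop := ∀ (arr : List Int), Dom_gcd_of_lcms arr → Pre_gcd_of_lcms arr → Spec_gcd_of_lcms arr (gcd_of_lcms arr)

-- ===== LEMMAS AND PROOFS =====

-- characterization of Python's gcd: the sign of the second argument (or the first, if the second is 0)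
theorem pyGcd_char (a b : Int) :
    pyGcd a b = if b = 0 then a else b.sign * (Int.gcd a b : Int) := by
  fun_induction pyGcd a b with
  | case1 a => simp
  | case2 a b h ih =>
    simp only [h, if_false]
    set m := PySem.Int.mod a b with hm
    have hgcd : Int.gcd b m = Int.gcd a b := by
      have hq := PySem.Int.floordiv_mul_add_mod a b
      have hmeq : m = a + b * (-(PySem.Int.floordiv a b)) := by rw [hm]; linarith
      rw [hmeq, Int.gcd_add_mul_left_right]
      exact Int.gcd_comm b a
    rw [ih]
    by_cases hm0 : m = 0
    · simp only [hm0, if_true]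
      rw [← hgcd, hm0, Int.gcd_zero_right]
      exact (Int.sign_mul_natAbs b).symm
    · simp only [hm0, if_false]
      rw [hgcd]
      congr 1
      rcases lt_trichotomy b 0 with hb | hb | hb
      · have h1 := PySem.Int.mod_neg_bounds a hb
        have hmneg : m < 0 := by omega
        rw [Int.sign_eq_neg_one_of_neg hmneg, Int.sign_eq_neg_one_of_neg hb]
      · exact absurd hb h
      · have h1 := PySem.Int.mod_nonneg a hb
        have hmpos : 0 < m := by omega
        rw [Int.sign_eq_one_of_pos hmpos, Int.sign_eq_one_of_pos hb]

theorem pyGcd_natAbs (a b : Int) : (pyGcd a b).natAbs = Int.gcd a b := by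
  rw [pyGcd_char]
  by_cases hb : b = 0
  · simp [hb, Int.gcd]
  · simp only [hb, if_false]
    rw [Int.natAbs_mul]
    rcases lt_trichotomy b 0 with h | h | h
    · simp [Int.sign_eq_neg_one_of_neg h]
    · exact absurd h hb
    · simp [Int.sign_eq_one_of_pos h]

theorem pyGcd_zero_right (a : Int) : pyGcd a 0 = a := by rw [pyGcd]; simp

theorem pyGcd_eq_zero_iff (a b : Int) : pyGcd a b = 0 ↔ a = 0 ∧ b = 0 := by
  rw [← Int.natAbs_eq_zero, pyGcd_natAbs]
  unfold Int.gcd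
  rw [Nat.gcd_eq_zero_iff]
  omega

theorem pyGcd_sign (a b : Int) (hb : b ≠ 0) : (pyGcd a b).sign = b.sign := by
  rw [pyGcd_char]
  simp only [hb, if_false]
  have hg : 0 < (Int.gcd a b : Int) := by
    have : Int.gcd a b ≠ 0 := by
      unfold Int.gcd
      rw [Ne, Nat.gcd_eq_zero_iff]
      omega
    omega
  rw [Int.sign_mul, Int.sign_eq_one_of_pos hg, mul_one, Int.sign_sign]

theorem pyGcd_self (a : Int) : pyGcd a a = a := by
  by_cases ha : a = 0
  · rw [ha, pyGcd_zero_right]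
  · have hm : PySem.Int.mod a a = 0 := (PySem.Int.mod_eq_zero_iff_dvd a a).mpr dvd_rfl
    rw [pyGcd, dif_neg ha, hm, pyGcd_zero_right]

theorem pyLcm_self (a : Int) (ha : a ≠ 0) : pyLcm a a = a := by
  unfold pyLcm
  rw [pyGcd_self]
  have hm : PySem.Int.mod (a * a) a = 0 := (PySem.Int.mod_eq_zero_iff_dvd _ a).mpr ⟨a, rfl⟩
  have hq := PySem.Int.floordiv_mul_add_mod (a * a) a
  rw [hm, add_zero] at hq
  exact mul_right_cancel₀ ha (by linarith)

-- last nonzero element of r :: xs (r if all of xs are zero)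
def lastNZ (r : Int) (xs : List Int) : Int :=
  xs.foldl (fun acc x => if x = 0 then acc else x) r

-- gcd of the absolute values, folded from m
def gAbs (m : Nat) (xs : List Int) : Nat :=
  xs.foldl (fun acc x => Nat.gcd acc x.natAbs) m

-- gcd of the absolute values of a list
def gList (xs : List Int) : Nat := xs.foldr (fun x acc => Nat.gcd x.natAbs acc) 0

theorem lastNZ_all_zero (r : Int) (l : List Int) (h : ∀ x ∈ l, x = 0) : lastNZ r l = r := by
  induction l generalizing r with
  | nil => rfl
  | cons x t ih =>
    have hx : x = 0 := h x (by simp)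
    simp only [lastNZ, List.foldl_cons, hx, if_pos rfl]
    exact ih r (fun y hy => h y (by simp [hy]))

theorem lastNZ_const (r c : Int) (l : List Int) (hne : l ≠ []) (h : ∀ x ∈ l, x = c)
    (hc : c ≠ 0) : lastNZ r l = c := by
  induction l generalizing r with
  | nil => exact absurd rfl hne
  | cons x t ih =>
    have hx : x = c := h x (by simp)
    simp only [lastNZ, List.foldl_cons, hx, if_neg hc]
    by_cases ht : t = []
    · subst ht; rfl
    · exact ih c ht (fun y hy => h y (by simp [hy]))

theorem lastNZ_start_irrel (a b : Int) (l : List Int) (h : ∃ x ∈ l, x ≠ 0) :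
    lastNZ a l = lastNZ b l := by
  induction l generalizing a b with
  | nil => simp at h
  | cons x t ih =>
    by_cases hx : x = 0
    · simp only [lastNZ, List.foldl_cons, hx, if_pos rfl]
      rcases h with ⟨y, hy, hyne⟩
      rcases List.mem_cons.mp hy with h1 | h1
      · exact absurd (h1 ▸ hx) hyne
      · exact ih a b ⟨y, h1, hyne⟩
    · simp only [lastNZ, List.foldl_cons]
      rw [if_neg hx, if_neg hx]

theorem lastNZ_sign_congr (a b : Int) (l : List Int) (h : a.sign = b.sign) :
    (lastNZ a l).sign = (lastNZ b l).sign := by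
  induction l generalizing a b with
  | nil => exact h
  | cons x t ih =>
    by_cases hx : x = 0
    · simp only [lastNZ, List.foldl_cons, hx, if_pos rfl]
      exact ih a b h
    · simp only [lastNZ, List.foldl_cons, if_neg hx]

-- the fold of Python's gcd, characterized: sign of the last nonzero entry times the gcd of the magnitudes
theorem fold_char (l : List Int) (r : Int) :
    l.foldl pyGcd r = (lastNZ r l).sign * (gAbs r.natAbs l : Int) := by
  induction l generalizing r with
  | nil => simpa [lastNZ, gAbs] using (Int.sign_mul_natAbs r).symm
  | cons x t ih =>
    simp only [List.foldl_cons]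
    rw [ih (pyGcd r x)]
    have habs : (pyGcd r x).natAbs = Nat.gcd r.natAbs x.natAbs := pyGcd_natAbs r x
    have hg : gAbs (pyGcd r x).natAbs t = gAbs r.natAbs (x :: t) := by
      simp [gAbs, habs]
    rw [hg]
    congr 1
    by_cases hx : x = 0
    · have : pyGcd r x = r := by rw [hx, pyGcd]; simp
      rw [this]
      simp [lastNZ, hx]
    · have h1 : (pyGcd r x).sign = x.sign := pyGcd_sign r x hx
      have h2 : lastNZ r (x :: t) = lastNZ x t := by simp [lastNZ, hx]
      rw [h2]
      exact lastNZ_sign_congr _ _ t h1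

theorem gAbs_eq (m : Nat) (l : List Int) : gAbs m l = Nat.gcd m (gList l) := by
  induction l generalizing m with
  | nil => simp [gAbs, gList]
  | cons x t ih =>
    simp only [gAbs, List.foldl_cons, gList, List.foldr_cons]
    rw [show (List.foldl (fun acc x => Nat.gcd acc x.natAbs) (Nat.gcd m x.natAbs) t) = gAbs (Nat.gcd m x.natAbs) t from rfl, ih]
    rw [show (List.foldr (fun x acc => Nat.gcd x.natAbs acc) 0 t) = gList t from rfl]
    exact Nat.gcd_assoc m x.natAbs (gList t)

theorem dvd_gList (d : Nat) (l : List Int) (h : ∀ x ∈ l, d ∣ x.natAbs) : d ∣ gList l := by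
  induction l with
  | nil => simp [gList]
  | cons x t ih =>
    simp only [gList, List.foldr_cons]
    exact Nat.dvd_gcd (h x (by simp)) (ih (fun y hy => h y (by simp [hy])))

theorem gList_dvd (l : List Int) (x : Int) (h : x ∈ l) : gList l ∣ x.natAbs := by
  induction l with
  | nil => simp at h
  | cons y t ih =>
    simp only [gList, List.foldr_cons]
    rcases List.mem_cons.mp h with h1 | h1
    · rw [h1]; exact Nat.gcd_dvd_left _ _
    · exact (Nat.gcd_dvd_right _ _).trans (ih h1)

-- the list of all pairwise gcds, in A's (i, j) order
def pairsG : List Int → List Int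
  | [] => []
  | x :: t => t.map (pyGcd x) ++ pairsG t

theorem pairsG_mem (l : List Int) (p : Int) (h : p ∈ pairsG l) :
    ∃ x ∈ l, ∃ y ∈ l, p = pyGcd x y := by
  induction l with
  | nil => simp [pairsG] at h
  | cons x t ih =>
    simp only [pairsG, List.mem_append, List.mem_map] at h
    rcases h with ⟨y, hy, hp⟩ | h1
    · exact ⟨x, by simp, y, by simp [hy], hp.symm⟩
    · rcases ih h1 with ⟨u, hu, v, hv, hp⟩
      exact ⟨u, by simp [hu], v, by simp [hv], hp⟩

theorem pairs_cover (l : List Int) (h2 : 2 ≤ l.length) (x : Int) (hx : x ∈ l) :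
    ∃ p ∈ pairsG l, p.natAbs ∣ x.natAbs := by
  induction l with
  | nil => simp at hx
  | cons u t ih =>
    match t, h2 with
    | v :: t', _ =>
      rcases List.mem_cons.mp hx with h1 | h1
      · refine ⟨pyGcd u v, ?_, ?_⟩
        · simp [pairsG]
        · rw [pyGcd_natAbs, h1]; exact Nat.gcd_dvd_left _ _
      · by_cases ht' : t' = []
        · subst ht'
          have hxv : x = v := by simpa using h1
          refine ⟨pyGcd u v, by simp [pairsG], ?_⟩
          rw [pyGcd_natAbs, hxv]; exact Nat.gcd_dvd_right _ _
        · have h2' : 2 ≤ (v :: t').length := by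
            cases t' with
            | nil => exact absurd rfl ht'
            | cons _ _ => simp
          rcases ih h2' h1 with ⟨p, hp, hdvd⟩
          refine ⟨p, ?_, hdvd⟩
          show p ∈ (v :: t').map (pyGcd u) ++ pairsG (v :: t')
          exact List.mem_append_right _ hp

theorem gList_pairsG (l : List Int) (h2 : 2 ≤ l.length) : gList (pairsG l) = gList l := by
  apply Nat.dvd_antisymm
  · apply dvd_gList
    intro x hx
    rcases pairs_cover l h2 x hx with ⟨p, hp, hdvd⟩
    exact (gList_dvd _ p hp).trans hdvd
  · apply dvd_gList
    intro p hp
    rcases pairsG_mem l p hp with ⟨x, hx, y, hy, hpeq⟩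
    rw [hpeq, pyGcd_natAbs]
    exact Nat.dvd_gcd (gList_dvd l x hx) (gList_dvd l y hy)

theorem sign_pairsG (l : List Int) (h2 : 2 ≤ l.length) (r : Int) :
    (lastNZ r (pairsG l)).sign = (lastNZ r l).sign := by
  induction l generalizing r with
  | nil => simp at h2
  | cons u t ih =>
    cases t with
    | nil => simp at h2
    | cons v t' =>
      have hsplit : lastNZ r (pairsG (u :: v :: t'))
          = lastNZ (lastNZ r ((v :: t').map (pyGcd u))) (pairsG (v :: t')) := by
        show lastNZ r (((v :: t').map (pyGcd u)) ++ pairsG (v :: t')) = _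
        simp [lastNZ, List.foldl_append]
      have hRHS : lastNZ r (u :: v :: t') = lastNZ (if u = 0 then r else u) (v :: t') := by
        show List.foldl _ (if u = 0 then r else u) (v :: t') = _
        rfl
      cases t' with
      | nil =>
        rw [hsplit, hRHS]
        by_cases hv : v = 0
        · subst hv
          simp [lastNZ, pairsG, pyGcd_zero_right]
        · have hp : pyGcd u v ≠ 0 := by
            rw [Ne, pyGcd_eq_zero_iff]; tauto
          simp only [List.map_cons, List.map_nil, pairsG]
          simp only [lastNZ, List.foldl_cons, List.foldl_nil, List.foldl_append]
          rw [if_neg hp, if_neg hv]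
          exact pyGcd_sign u v hv
      | cons w t'' =>
        have ih' := ih (by simp)
        rw [hsplit, ih' _, hRHS]
        by_cases hnz : ∃ x ∈ v :: w :: t'', x ≠ 0
        · rw [lastNZ_start_irrel _ (if u = 0 then r else u) _ hnz]
        · push_neg at hnz
          rw [lastNZ_all_zero _ _ hnz, lastNZ_all_zero _ _ hnz]
          have hmap : ∀ y ∈ (v :: w :: t'').map (pyGcd u), y = u := by
            intro y hy
            rcases List.mem_map.mp hy with ⟨x, hx, hyx⟩
            rw [← hyx, hnz x hx, pyGcd_zero_right]
          by_cases hu : u = 0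
          · rw [lastNZ_all_zero r _ (by intro y hy; rw [hmap y hy, hu]), if_pos hu]
          · rw [lastNZ_const r u _ (by simp) hmap hu, if_neg hu]

-- A's double index loop equals a fold of pyGcd over the structural pairs list
theorem outer_struct (arr : List Int) (g : Int) :
    (List.range arr.length).foldl (fun g i =>
      ((arr.drop (i + 1)).foldl (fun g y => pyGcd g (pyGcd (arr.getD i 0) y)) g)) g
    = (pairsG arr).foldl pyGcd g := by
  induction arr generalizing g with
  | nil => simp [pairsG]
  | cons x t ih =>
    rw [show (x :: t).length = t.length + 1 from rfl, List.range_succ_eq_map]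
    simp only [List.foldl_cons, List.foldl_map, List.drop_succ_cons, List.getD_cons_succ,
      List.getD_cons_zero, List.drop_zero]
    rw [ih]
    show _ = (t.map (pyGcd x) ++ pairsG t).foldl pyGcd g
    rw [List.foldl_append, List.foldl_map]

theorem A_eq_pairs (arr : List Int) (g : Int) :
    (PySem.List.pyRange 0 (arr.length : Int) 1).foldl (fun g i =>
      (PySem.List.pyRange (i + 1) (arr.length : Int) 1).foldl (fun g j =>
        pyGcd g (pyGcd (PySem.List.pyGetD arr i 0) (PySem.List.pyGetD arr j 0))) g) g
    = (pairsG arr).foldl pyGcd g := by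
  rw [PySem.List.pyRange_zero_nat, List.foldl_map, ← outer_struct]
  apply PySem.List.foldl_congr_mem
  intro acc k _
  have h1 := PySem.List.foldl_pyRange_pyGetD' (xs := arr) (d := 0)
    (f := fun g y => pyGcd g (pyGcd (PySem.List.pyGetD arr (k : Int) 0) y))
    (init := acc) (a := (k : Int) + 1) (by omega)
  simp only [h1]
  have h2 : ((k : Int) + 1).toNat = k + 1 := by omega
  rw [h2, PySem.List.pyGetD_natCast]

theorem gcdLoop_eq_pyGcd (a b : Int) : gcdLoop a b = pyGcd a b := by
  by_cases h : b = 0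
  · rw [gcdLoop, pyGcd]; simp [h]
  · rw [gcdLoop, pyGcd]
    simp only [h, dite_false]
    have := pyModAbs_lt (a := a) h
    exact gcdLoop_eq_pyGcd b (PySem.Int.mod a b)
termination_by b.natAbs

theorem ports_agree (arr : List Int)
    (hne : arr ≠ []) (hz : ¬(arr.headI = 0 ∧ arr.getLastD 0 = 0)) :
    gcd_of_lcms arr = gcd_of_lcms_alt arr := by
  rcases arr with _ | ⟨a0, rest⟩
  · exact absurd rfl hne
  have hget0 : PySem.List.pyGet? (a0 :: rest) 0 = some a0 := by
    simp
  have hgetl : PySem.List.pyGet? (a0 :: rest) (-1)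
      = some ((a0 :: rest).getLast (by simp)) := by
    rw [PySem.List.pyGet?_neg_one, List.getLast?_eq_some_getLast]
  set xl := (a0 :: rest).getLast (by simp) with hxl
  rw [gcd_of_lcms, gcd_of_lcms_alt, hget0, hgetl]
  simp only
  rw [A_eq_pairs]
  have hB : (a0 :: rest).foldl (fun r x => gcdLoop r x)
      (PySem.Int.floordiv (a0 * xl) (gcdLoop a0 xl))
      = (a0 :: rest).foldl pyGcd (pyLcm a0 xl) := by
    rw [show (fun r x => gcdLoop r x) = pyGcd from funext fun r => funext fun x => gcdLoop_eq_pyGcd r x]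
    rw [pyLcm, gcdLoop_eq_pyGcd]
  rw [hB]
  rcases rest with _ | ⟨b0, rest'⟩
  · have hxa : xl = a0 := by simp [hxl]
    have ha0 : a0 ≠ 0 := by
      intro h; apply hz; constructor <;> simp [List.headI, h, List.getLastD]
    rw [hxa]
    show pyLcm a0 a0 = List.foldl pyGcd (pyLcm a0 a0) [a0]
    rw [pyLcm_self a0 ha0]
    simp [pyGcd_self]
  · have h2 : 2 ≤ (a0 :: b0 :: rest').length := by simp
    rw [fold_char, fold_char, sign_pairsG _ h2, gAbs_eq, gAbs_eq, gList_pairsG _ h2]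

-- ===== VERDICT (by name: the statement is the Claim_ definition above) =====
theorem gcd_of_lcms_spec : Claim_equal_gcd_of_lcms := by
  intro arr _ hpre
  unfold Pre_gcd_of_lcms at hpre
  unfold Spec_gcd_of_lcms
  exact ports_agree arr hpre.1 hpre.2
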